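-- pv_equiv track=rewrite | github.com/catigator/aoc_cookiecutter | template/utils/helper_functions.py | split_list_on_entry
-- ===== SOURCE A (Python) =====
-- from typing import List
--
-- def split_list_on_entry(entries: List, signifier):
--     split_list = []
--     temp = []
--     for entry in entries:
--         if entry != signifier:
--             temp.append(entry)
--         else:
--             split_list.append(temp)
--             temp = []
--
--     if temp != []:
--         split_list.append(temp)
--
--     return split_list
-- ===== SOURCE B (Python) =====
-- def split_list_on_entry(entries, signifier):
--     if signifier not in entries:
--         return [entries] if entries else []
--     j = entries.index(signifier)
--     return [entries[:j]] + split_list_on_entry(entries[j+1:], signifier)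
-- ===== Notes on version B (the rewrite author's own statement) =====
-- stated objective: alternative
-- what changed: Replaced the single-pass temp-buffer accumulation with a recursive find-and-slice decomposition: locate the first signifier with .index, emit the prefix slice, and recurse on the suffix; the trailing-empty-segment drop falls out of the base case.
import Mathlib
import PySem

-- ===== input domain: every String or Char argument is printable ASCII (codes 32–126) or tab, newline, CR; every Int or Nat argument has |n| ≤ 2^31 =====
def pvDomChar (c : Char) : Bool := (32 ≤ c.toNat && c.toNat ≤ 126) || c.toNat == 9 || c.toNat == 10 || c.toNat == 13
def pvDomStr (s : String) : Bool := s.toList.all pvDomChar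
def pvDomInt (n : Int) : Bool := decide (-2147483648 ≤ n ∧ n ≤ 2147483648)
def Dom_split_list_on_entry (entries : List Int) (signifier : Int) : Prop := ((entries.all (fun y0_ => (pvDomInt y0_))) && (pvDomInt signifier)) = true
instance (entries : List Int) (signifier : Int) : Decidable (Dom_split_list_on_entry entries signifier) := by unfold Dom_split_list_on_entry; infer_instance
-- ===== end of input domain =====

-- B replaces A's temp-buffer single pass by a recursive find-first-separator-and-slice decomposition (alternative; same cost).

-- ===== PORT A =====
def split_list_on_entry (entries : List Int) (signifier : Int) : List (List Int) :=
  let r := entries.foldl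
    (fun st entry =>
      if entry ≠ signifier then (st.1, st.2 ++ [entry])
      else (st.1 ++ [st.2], ([] : List Int)))
    (([] : List (List Int)), ([] : List Int))
  if r.2 ≠ [] then r.1 ++ [r.2] else r.1

-- ===== PORT B =====
-- termination helper for the port's recursion (cited by decreasing_by)
theorem pv_slice_suffix_lt {xs : List Int} {v : Int} {j : Nat}
    (h : PySem.List.index? xs v = some j) :
    (PySem.List.slice xs (some ((j : Int) + 1)) none).length < xs.length := by
  obtain ⟨pre, suf, hxs, hlen, -⟩ := (PySem.List.index?_eq_some_iff _ _ _).1 h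
  have : ((j : Int) + 1) = ((j + 1 : Nat) : Int) := by push_cast; ring
  rw [this, PySem.List.slice_from_natCast]
  subst hxs
  simp [← hlen]
  omega

def split_list_on_entry_alt (entries : List Int) (signifier : Int) : List (List Int) :=
  match _h : PySem.List.index? entries signifier with
  | none => if entries ≠ [] then [entries] else []
  | some j =>
      [PySem.List.slice entries none (some (j : Int))] ++
        split_list_on_entry_alt (PySem.List.slice entries (some ((j : Int) + 1)) none) signifier
termination_by entries.length
decreasing_by exact pv_slice_suffix_lt (by assumption)

-- ===== PRECONDITION & SPEC =====
def Spec_split_list_on_entry (entries : List Int) (signifier : Int) (out : List (List Int)) : Prop := out = split_list_on_entry_alt entries signifier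
instance (entries : List Int) (signifier : Int) (out : List (List Int)) : Decidable (Spec_split_list_on_entry entries signifier out) := by unfold Spec_split_list_on_entry; infer_instance

-- ===== CLAIM (what is proved, stated in full; the proofs are below) =====
def Claim_equal_split_list_on_entry : Prop := ∀ (entries : List Int) (signifier : Int), Dom_split_list_on_entry entries signifier → Spec_split_list_on_entry entries signifier (split_list_on_entry entries signifier)

-- ===== LEMMAS AND PROOFS =====

-- common reference recursion: A's loop with explicit temp buffer
def goSplit (sig : Int) : List Int → List Int → List (List Int)
  | [], temp => if temp ≠ [] then [temp] else []
  | e :: rest, temp =>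
      if e ≠ sig then goSplit sig rest (temp ++ [e]) else temp :: goSplit sig rest []

theorem a_foldl_eq_go (sig : Int) (xs : List Int) :
    ∀ (s : List (List Int)) (t : List Int),
      (let r := xs.foldl
          (fun st entry =>
            if entry ≠ sig then (st.1, st.2 ++ [entry])
            else (st.1 ++ [st.2], ([] : List Int))) (s, t)
       if r.2 ≠ [] then r.1 ++ [r.2] else r.1) = s ++ goSplit sig xs t := by
  induction xs with
  | nil =>
      intro s t
      simp only [List.foldl_nil, goSplit]
      split_ifs <;> simp
  | cons e rest ih =>
      intro s t
      simp only [List.foldl_cons, goSplit]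
      by_cases he : e = sig
      · simp only [he, ne_eq, not_true_eq_false, if_false]
        rw [ih (s ++ [t]) []]
        simp
      · simp only [ne_eq, he, not_false_eq_true, if_true]
        exact ih s (t ++ [e])

theorem a_eq_go (xs : List Int) (sig : Int) :
    split_list_on_entry xs sig = goSplit sig xs [] := by
  have := a_foldl_eq_go sig xs [] []
  simpa [split_list_on_entry] using this

theorem go_of_not_mem (sig : Int) (xs : List Int) (hm : sig ∉ xs) :
    ∀ temp : List Int, goSplit sig xs temp =
      if temp ++ xs ≠ [] then [temp ++ xs] else [] := by
  induction xs with
  | nil => intro temp; simp [goSplit]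
  | cons e rest ih =>
      intro temp
      have he : e ≠ sig := fun h => hm (h ▸ List.mem_cons_self ..)
      have hm' : sig ∉ rest := fun h => hm (List.mem_cons_of_mem _ h)
      simp only [goSplit, ne_eq, he, not_false_eq_true, if_true, ih hm']
      simp

theorem go_split_at_sig (sig : Int) (pre suf : List Int) (hm : sig ∉ pre) :
    ∀ temp : List Int,
      goSplit sig (pre ++ sig :: suf) temp = (temp ++ pre) :: goSplit sig suf [] := by
  induction pre with
  | nil => intro temp; simp [goSplit]
  | cons p pre ih =>
      intro temp
      have hp : p ≠ sig := fun h => hm (h ▸ List.mem_cons_self ..)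
      have hm' : sig ∉ pre := fun h => hm (List.mem_cons_of_mem _ h)
      simp only [List.cons_append, goSplit, ne_eq, hp, not_false_eq_true, if_true,
        ih hm']
      simp

theorem alt_eq_go (xs : List Int) (sig : Int) :
    split_list_on_entry_alt xs sig = goSplit sig xs [] := by
  rw [split_list_on_entry_alt]
  split
  next h =>
      have hm : sig ∉ xs := (PySem.List.index?_eq_none_iff _ _).1 h
      rw [go_of_not_mem sig xs hm []]
      simp
  next j h =>
      obtain ⟨pre, suf, hxs, hlen, hpre⟩ := (PySem.List.index?_eq_some_iff _ _ _).1 h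
      have hrec := alt_eq_go (PySem.List.slice xs (some ((j : Int) + 1)) none) sig
      rw [hrec]
      have h1 : PySem.List.slice xs none (some (j : Int)) = pre := by
        rw [PySem.List.slice_to_natCast]
        subst hxs; rw [← hlen]; simp
      have h2 : PySem.List.slice xs (some ((j : Int) + 1)) none = suf := by
        have : ((j : Int) + 1) = ((j + 1 : Nat) : Int) := by push_cast; ring
        rw [this, PySem.List.slice_from_natCast]
        subst hxs; rw [← hlen]
        simp [Nat.add_comm _ 1, List.drop_append]
      rw [h1, h2]
      rw [hxs, go_split_at_sig sig pre suf hpre []]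
      simp
termination_by xs.length
decreasing_by exact pv_slice_suffix_lt (by assumption)

-- ===== VERDICT (by name: the statement is the Claim_ definition above) =====
theorem split_list_on_entry_spec : Claim_equal_split_list_on_entry := by
  intro entries signifier _
  unfold Spec_split_list_on_entry
  rw [a_eq_go, alt_eq_go]
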